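-- pv_equiv track=rewrite | github.com/likalikali/qrent-packages-agent | packages/scraper/src/scrapers/domain.py | _parse_address_line2
-- ===== SOURCE A (Python) =====
-- def _parse_address_line2(address_line2: str) -> tuple:
--     """解析 addressLine2 获取区域信息"""
--     suburb, state, postcode = "", "NSW", ""
--
--     if not address_line2:
--         return suburb, state, postcode
--
--     try:
--         parts = address_line2.replace('-', ' ').split()
--         for i, part in enumerate(parts):
--             if part.upper() == 'NSW':
--                 suburb = ' '.join(parts[:i]).strip().lower()
--                 state = 'NSW'
--                 if i + 1 < len(parts):
--                     postcode = parts[i + 1]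
--                 break
--     except Exception:
--         pass
--
--     return suburb, state, postcode
-- ===== SOURCE B (Python) =====
-- def _parse_address_line2(address_line2: str) -> tuple:
--     """Single forward scan over the tokens with an accumulated prefix,
--     early-returning on the first NSW token (next(it, '') gives the postcode)."""
--     prefix = []
--     it = iter(address_line2.replace('-', ' ').split())
--     for tok in it:
--         if tok.upper() == 'NSW':
--             return ' '.join(prefix).lower(), 'NSW', next(it, '')
--         prefix.append(tok)
--     return '', 'NSW', ''
-- ===== Notes on version B (the rewrite author's own statement) =====
-- stated objective: simpler
-- what changed: Replaces the enumerate/index loop with prefix slicing, post-break state mutation and a bounds-checked parts[i+1] lookup by a single forward scan that accumulates the prefix and early-returns the suburb/state together with the next token (if any) as the postcode.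
import Mathlib
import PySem

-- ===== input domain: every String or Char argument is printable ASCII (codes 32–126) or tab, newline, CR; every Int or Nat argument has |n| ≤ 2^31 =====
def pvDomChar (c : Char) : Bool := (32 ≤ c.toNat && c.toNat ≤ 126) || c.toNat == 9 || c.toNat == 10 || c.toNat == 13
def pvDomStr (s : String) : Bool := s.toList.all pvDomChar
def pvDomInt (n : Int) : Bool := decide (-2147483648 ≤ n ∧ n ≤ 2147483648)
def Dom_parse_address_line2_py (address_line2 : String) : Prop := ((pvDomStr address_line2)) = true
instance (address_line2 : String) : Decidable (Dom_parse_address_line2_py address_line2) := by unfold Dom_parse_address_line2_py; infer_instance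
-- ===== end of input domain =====

-- B replaces A's enumerate/index loop (prefix slice + bounds-checked parts[i+1] after break)
-- by a single forward scan with an accumulated prefix and an early return (objective: simpler).

-- ===== PORT A =====
-- the 'for i, part in enumerate(parts)' loop with break: recursion over the
-- remaining parts carrying the running index i; on the NSW hit it builds the
-- suburb from parts[:i] and the postcode from parts[i+1] exactly as A does.
def pvLoopA (parts : List String) : Nat → List String → String × String × String
  | _, [] => ("", "NSW", "")
  | i, part :: rest =>
    if PySem.Str.upper part == "NSW" then
      (PySem.Str.lower (PySem.Str.strip
        (PySem.Str.join " " (PySem.List.slice parts none (some (i : Int))))), "NSW",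
       if i + 1 < parts.length then PySem.List.pyGetD parts ((i : Int) + 1) "" else "")
    else pvLoopA parts (i + 1) rest

def parse_address_line2_py (address_line2 : String) : String × String × String :=
  if PySem.Str.len address_line2 == 0 then ("", "NSW", "")
  else
    let parts := PySem.Str.split₀ (PySem.Str.replace address_line2 "-" " ")
    pvLoopA parts 0 parts

-- ===== PORT B =====
-- B's scan: iterate over the tokens, accumulating the prefix; on the first NSW
-- token return (join(prefix).lower(), 'NSW', next(it, '')).
def pvScanB : List String → List String → String × String × String
  | [], _ => ("", "NSW", "")
  | tok :: rest, prefixAcc =>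
    if PySem.Str.upper tok == "NSW" then
      (PySem.Str.lower (PySem.Str.join " " prefixAcc), "NSW", rest.headD "")
    else pvScanB rest (prefixAcc ++ [tok])

def parse_address_line2_py_alt (address_line2 : String) : String × String × String :=
  pvScanB (PySem.Str.split₀ (PySem.Str.replace address_line2 "-" " ")) []

-- ===== PRECONDITION & SPEC =====
def Spec_parse_address_line2_py (address_line2 : String) (out : String × String × String) : Prop := out = parse_address_line2_py_alt address_line2
instance (address_line2 : String) (out : String × String × String) : Decidable (Spec_parse_address_line2_py address_line2 out) := by unfold Spec_parse_address_line2_py; infer_instance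

-- ===== CLAIM (what is proved, stated in full; the proofs are below) =====
def Claim_equal_parse_address_line2_py : Prop := ∀ (address_line2 : String), Dom_parse_address_line2_py address_line2 → Spec_parse_address_line2_py address_line2 (parse_address_line2_py address_line2)

-- ===== LEMMAS AND PROOFS =====

-- a token is nonempty and contains no whitespace character
def pvGoodTok (t : List Char) : Prop := t ≠ [] ∧ ∀ c ∈ t, PySem.Chars.isspace c = false

lemma pvSplitGoGood (s : List Char) : ∀ (cur : List Char) (acc : List (List Char)),
    (∀ c ∈ cur, PySem.Chars.isspace c = false) →
    (∀ t ∈ acc, pvGoodTok t) →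
    ∀ t ∈ PySem.Chars.split₀.go s cur acc, pvGoodTok t := by
  induction s with
  | nil =>
    intro cur acc hcur hacc t ht
    simp only [PySem.Chars.split₀.go] at ht
    by_cases h : cur.isEmpty
    · simp [h] at ht; exact hacc t ht
    · simp [h] at ht
      rcases ht with ht | ht
      · exact hacc t ht
      · subst ht
        refine ⟨by simpa using (List.isEmpty_eq_false_iff.mp (by simpa using h)), ?_⟩
        intro c hc; exact hcur c (List.mem_reverse.mp hc)
  | cons c rest ih =>
    intro cur acc hcur hacc t ht
    simp only [PySem.Chars.split₀.go] at ht
    by_cases hsp : PySem.Chars.isspace c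
    · by_cases hemp : cur.isEmpty
      · simp [hsp, hemp] at ht
        exact ih [] acc (by simp) hacc t ht
      · simp [hsp, hemp] at ht
        refine ih [] (cur.reverse :: acc) (by simp) ?_ t ht
        intro u hu
        rcases List.mem_cons.mp hu with hu | hu
        · subst hu
          refine ⟨by simpa using (List.isEmpty_eq_false_iff.mp (by simpa using hemp)), ?_⟩
          intro d hd; exact hcur d (List.mem_reverse.mp hd)
        · exact hacc u hu
    · simp [hsp] at ht
      refine ih (c :: cur) acc ?_ hacc t ht
      intro d hd
      rcases List.mem_cons.mp hd with hd | hd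
      · subst hd; simpa using hsp
      · exact hcur d hd

lemma pvSplitGood (s : List Char) : ∀ t ∈ PySem.Chars.split₀ s, pvGoodTok t :=
  fun t ht => pvSplitGoGood s [] [] (by simp) (by simp) t ht

lemma pvDropWhileSelf (p : Char → Bool) (l : List Char)
    (h : ∀ c, l.head? = some c → p c = false) : l.dropWhile p = l := by
  cases l with
  | nil => rfl
  | cons c cs => simp [List.dropWhile, h c rfl]

lemma pvJoinCons2 (x y : List Char) (l : List (List Char)) :
    PySem.Chars.join [' '] (x :: y :: l) = x ++ ' ' :: PySem.Chars.join [' '] (y :: l) := by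
  simp [PySem.Chars.join, List.intercalate, List.intersperse]

lemma pvJoinSingleton (x : List Char) : PySem.Chars.join [' '] [x] = x := by
  simp [PySem.Chars.join, List.intercalate]

lemma pvJoinNeNil (t : List Char) (ts : List (List Char)) (ht : t ≠ []) :
    PySem.Chars.join [' '] (t :: ts) ≠ [] := by
  cases ts with
  | nil => simpa [pvJoinSingleton] using ht
  | cons y l => rw [pvJoinCons2]; simp

lemma pvJoinHead (toks : List (List Char)) (h : ∀ t ∈ toks, pvGoodTok t) :
    ∀ c, (PySem.Chars.join [' '] toks).head? = some c → PySem.Chars.isspace c = false := by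
  cases toks with
  | nil => intro c hc; simp [PySem.Chars.join, List.intercalate] at hc
  | cons t ts =>
    intro c hc
    obtain ⟨hne, hns⟩ := h t (by simp)
    have hhd : (PySem.Chars.join [' '] (t :: ts)).head? = t.head? := by
      cases ts with
      | nil => rw [pvJoinSingleton]
      | cons y l =>
        rw [pvJoinCons2]
        cases t with
        | nil => exact absurd rfl hne
        | cons d ds => simp
    rw [hhd] at hc
    exact hns c (List.mem_of_mem_head? hc)

lemma pvJoinLast (toks : List (List Char)) (h : ∀ t ∈ toks, pvGoodTok t) :
    ∀ c, (PySem.Chars.join [' '] toks).getLast? = some c → PySem.Chars.isspace c = false := by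
  induction toks with
  | nil => intro c hc; simp [PySem.Chars.join, List.intercalate] at hc
  | cons t ts ih =>
    intro c hc
    obtain ⟨hne, hns⟩ := h t (by simp)
    cases ts with
    | nil =>
      rw [pvJoinSingleton] at hc
      exact hns c (List.mem_of_getLast? hc)
    | cons y l =>
      rw [pvJoinCons2] at hc
      have hyne : (y : List Char) ≠ [] := (h y (by simp)).1
      have hjne : PySem.Chars.join [' '] (y :: l) ≠ [] := pvJoinNeNil y l hyne
      rw [List.getLast?_append_of_ne_nil t (by simp)] at hc
      have : (' ' :: PySem.Chars.join [' '] (y :: l)) = [' '] ++ PySem.Chars.join [' '] (y :: l) := rfl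
      rw [this, List.getLast?_append_of_ne_nil [' '] hjne] at hc
      exact ih (fun u hu => h u (by simp [hu])) c hc

lemma pvStripJoin (toks : List (List Char)) (h : ∀ t ∈ toks, pvGoodTok t) :
    PySem.Chars.strip (PySem.Chars.join [' '] toks) = PySem.Chars.join [' '] toks := by
  unfold PySem.Chars.strip PySem.Chars.lstrip PySem.Chars.rstrip
  rw [pvDropWhileSelf _ _ (pvJoinHead toks h)]
  rw [pvDropWhileSelf _ _ (fun c hc =>
    pvJoinLast toks h c (by rwa [List.head?_reverse] at hc))]
  exact List.reverse_reverse _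

lemma pvStripJoinStr (parts : List String) (h : ∀ p ∈ parts, pvGoodTok p.toList) :
    PySem.Str.strip (PySem.Str.join " " parts) = PySem.Str.join " " parts := by
  unfold PySem.Str.strip PySem.Str.join
  rw [String.toList_ofList]
  have : (" " : String).toList = [' '] := by decide
  rw [this, pvStripJoin (parts.map String.toList) ?_]
  intro t ht
  obtain ⟨p, hp, rfl⟩ := List.mem_map.mp ht
  exact h p hp

lemma pvGetDMid (acc : List String) (x y : String) (l : List String) :
    (acc ++ x :: y :: l).getD (acc.length + 1) "" = y := by
  induction acc with
  | nil => rfl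
  | cons a as ih => simp

lemma pvLoopEq (parts : List String) (hp : ∀ p ∈ parts, pvGoodTok p.toList) :
    ∀ (rest acc : List String), parts = acc ++ rest →
      pvLoopA parts acc.length rest = pvScanB rest acc := by
  intro rest
  induction rest with
  | nil => intro acc _; rfl
  | cons t rest' ih =>
    intro acc heq
    show (if PySem.Str.upper t == "NSW" then _ else pvLoopA parts (acc.length + 1) rest')
        = (if PySem.Str.upper t == "NSW" then _ else pvScanB rest' (acc ++ [t]))
    by_cases hnsw : PySem.Str.upper t == "NSW"
    · simp only [hnsw, if_pos]
      have htake : PySem.List.slice parts none (some ((acc.length : Nat) : Int)) = acc := by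
        rw [PySem.List.slice_to_natCast, heq, List.take_left]
      refine Prod.ext ?_ (Prod.ext rfl ?_)
      · show PySem.Str.lower (PySem.Str.strip (PySem.Str.join " "
            (PySem.List.slice parts none (some ((acc.length : Nat) : Int)))))
          = PySem.Str.lower (PySem.Str.join " " acc)
        rw [htake, pvStripJoinStr acc (fun p hpm => hp p (by simp [heq, hpm]))]
      · show (if acc.length + 1 < parts.length
              then PySem.List.pyGetD parts (((acc.length : Nat) : Int) + 1) "" else "")
            = rest'.headD ""
        cases rest' with
        | nil =>
          have : ¬ (acc.length + 1 < parts.length) := by simp [heq]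
          simp [this]
        | cons r rs =>
          have hlt : acc.length + 1 < parts.length := by simp [heq]
          rw [if_pos hlt]
          have hcast : ((acc.length : Nat) : Int) + 1 = ((acc.length + 1 : Nat) : Int) := by
            push_cast; ring
          rw [hcast, PySem.List.pyGetD_natCast, heq, pvGetDMid]
          rfl
    · simp only [hnsw, if_neg, Bool.false_eq_true, not_false_iff]
      have hlen : acc.length + 1 = (acc ++ [t]).length := by simp
      rw [hlen]
      exact ih (acc ++ [t]) (by simp [heq])

lemma pvAltEmpty (s : String) (h : s.toList = []) :
    parse_address_line2_py_alt s = ("", "NSW", "") := by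
  unfold parse_address_line2_py_alt
  unfold PySem.Str.split₀ PySem.Str.replace
  rw [h]
  rfl

-- ===== VERDICT (by name: the statement is the Claim_ definition above) =====
theorem parse_address_line2_py_spec : Claim_equal_parse_address_line2_py := by
  intro s _
  show parse_address_line2_py s = parse_address_line2_py_alt s
  unfold parse_address_line2_py
  by_cases h : PySem.Str.len s == 0
  · rw [if_pos h]
    have hl : s.toList = [] := by
      have := of_decide_eq_true h
      simpa [PySem.Str.len] using this
    rw [pvAltEmpty s hl]
  · rw [if_neg h]
    have hgood : ∀ p ∈ PySem.Str.split₀ (PySem.Str.replace s "-" " "), pvGoodTok p.toList := by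
      intro p hpm
      unfold PySem.Str.split₀ at hpm
      obtain ⟨t, ht, rfl⟩ := List.mem_map.mp hpm
      rw [String.toList_ofList]
      exact pvSplitGood _ t ht
    have := pvLoopEq (PySem.Str.split₀ (PySem.Str.replace s "-" " ")) hgood
      (PySem.Str.split₀ (PySem.Str.replace s "-" " ")) [] rfl
    simpa using this
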